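-- pv_equiv track=rewrite | github.com/oxai/debias-gensynth | measure_bias.py | assign_gender_label
-- ===== SOURCE A (Python) =====
-- def assign_gender_label(sentence, male_words, female_words):
--     # Convert the sentence to lowercase and split into words
--     words = set(sentence.lower().split())
--
--     # Check for the presence of male and female words in the sentence
--     male_words_present = any(word in words for word in male_words)
--     female_words_present = any(word in words for word in female_words)
--
--     # Assign a gender label based on the presence of male and female words
--     if male_words_present and not female_words_present:
--         return 0  # Male
--     elif female_words_present and not male_words_present:
--         return 1  # Female
--     elif male_words_present and female_words_present:
--         return 2
--     else:
--         return -1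
-- ===== SOURCE B (Python) =====
-- def assign_gender_label(sentence, male_words, female_words):
--     male_set = set(male_words)
--     female_set = set(female_words)
--     male_present = False
--     female_present = False
--     for word in sentence.lower().split():
--         if word in male_set:
--             male_present = True
--         if word in female_set:
--             female_present = True
--     return int(male_present) + 2 * int(female_present) - 1
-- ===== Notes on version B (the rewrite author's own statement) =====
-- stated objective: simpler
-- what changed: B reverses the loop orientation (one pass over the sentence's words against pre-built gender-word sets instead of two any-scans of the gender lists against the word set) and replaces the four-branch if/elif with the closed form m + 2*f - 1.
import Mathlib
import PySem

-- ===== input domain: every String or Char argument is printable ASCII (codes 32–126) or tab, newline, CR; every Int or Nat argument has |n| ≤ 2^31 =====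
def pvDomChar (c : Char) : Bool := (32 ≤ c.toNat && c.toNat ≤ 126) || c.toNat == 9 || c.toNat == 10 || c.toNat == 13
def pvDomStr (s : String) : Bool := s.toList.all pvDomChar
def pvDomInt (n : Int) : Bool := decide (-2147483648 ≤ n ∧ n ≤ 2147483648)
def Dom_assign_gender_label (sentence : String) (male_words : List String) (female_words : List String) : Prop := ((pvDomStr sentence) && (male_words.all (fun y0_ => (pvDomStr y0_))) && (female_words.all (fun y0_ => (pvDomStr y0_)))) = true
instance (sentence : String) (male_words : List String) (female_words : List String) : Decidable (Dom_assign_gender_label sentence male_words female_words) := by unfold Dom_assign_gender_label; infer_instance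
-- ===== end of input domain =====

-- B reverses the loop orientation (one pass over the sentence words against gender-word sets)
-- and replaces the four-branch if/elif by the closed form m + 2*f - 1; equivalence proved on Dom.


-- ===== PORT A =====
def assign_gender_label (sentence : String) (male_words : List String) (female_words : List String) : Int :=
  let words : PySem.Set String := PySem.Set.ofList (PySem.Str.split₀ (PySem.Str.lower sentence))
  let male_words_present : Bool := male_words.any (fun word => PySem.Set.contains words word)
  let female_words_present : Bool := female_words.any (fun word => PySem.Set.contains words word)
  if male_words_present && !female_words_present then 0
  else if female_words_present && !male_words_present then 1
  else if male_words_present && female_words_present then 2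
  else -1

-- ===== PORT B =====
def assign_gender_label_alt (sentence : String) (male_words : List String) (female_words : List String) : Int :=
  let male_set : PySem.Set String := PySem.Set.ofList male_words
  let female_set : PySem.Set String := PySem.Set.ofList female_words
  let flags : Bool × Bool :=
    (PySem.Str.split₀ (PySem.Str.lower sentence)).foldl
      (fun mf word =>
        ((if PySem.Set.contains male_set word then true else mf.1),
         (if PySem.Set.contains female_set word then true else mf.2)))
      (false, false)
  (if flags.1 then 1 else 0) + 2 * (if flags.2 then 1 else 0) - 1

-- ===== PRECONDITION & SPEC =====
def Spec_assign_gender_label (sentence : String) (male_words : List String) (female_words : List String) (out : Int) : Prop := out = assign_gender_label_alt sentence male_words female_words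
instance (sentence : String) (male_words : List String) (female_words : List String) (out : Int) : Decidable (Spec_assign_gender_label sentence male_words female_words out) := by unfold Spec_assign_gender_label; infer_instance

-- ===== CLAIM (what is proved, stated in full; the proofs are below) =====
def Claim_equal_assign_gender_label : Prop := ∀ (sentence : String) (male_words : List String) (female_words : List String), Dom_assign_gender_label sentence male_words female_words → Spec_assign_gender_label sentence male_words female_words (assign_gender_label sentence male_words female_words)

-- ===== LEMMAS AND PROOFS =====

-- The flag-pair fold computes the two `any`s over the word list.
theorem foldl_flags_eq {α : Type} (p q : α → Bool) (l : List α) (m f : Bool) :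
    l.foldl (fun mf x => ((if p x then true else mf.1), (if q x then true else mf.2))) (m, f)
      = (m || l.any p, f || l.any q) := by
  induction l generalizing m f with
  | nil => simp
  | cons a t ih =>
    simp only [List.foldl_cons, List.any_cons, ih]
    cases hp : p a <;> cases hq : q a <;> simp

-- "some gender word is in the word set" = "some word is in the gender-word set".
theorem any_contains_swap (ws l : List String) :
    l.any (fun w => PySem.Set.contains (PySem.Set.ofList ws) w)
      = ws.any (fun w => PySem.Set.contains (PySem.Set.ofList l) w) := by
  by_cases h : ∃ x, x ∈ l ∧ x ∈ ws
  · obtain ⟨x, hl, hw⟩ := h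
    have h1 : l.any (fun w => PySem.Set.contains (PySem.Set.ofList ws) w) = true :=
      List.any_eq_true.mpr ⟨x, hl, by simpa [PySem.Set.contains_iff, PySem.Set.mem_ofList] using hw⟩
    have h2 : ws.any (fun w => PySem.Set.contains (PySem.Set.ofList l) w) = true :=
      List.any_eq_true.mpr ⟨x, hw, by simpa [PySem.Set.contains_iff, PySem.Set.mem_ofList] using hl⟩
    rw [h1, h2]
  · have h1 : l.any (fun w => PySem.Set.contains (PySem.Set.ofList ws) w) = false := by
      rw [List.any_eq_false]; intro x hx hc
      exact h ⟨x, hx, by simpa [PySem.Set.contains_iff, PySem.Set.mem_ofList] using hc⟩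
    have h2 : ws.any (fun w => PySem.Set.contains (PySem.Set.ofList l) w) = false := by
      rw [List.any_eq_false]; intro x hx hc
      exact h ⟨x, by simpa [PySem.Set.contains_iff, PySem.Set.mem_ofList] using hc, hx⟩
    rw [h1, h2]

-- ===== VERDICT (by name: the statement is the Claim_ definition above) =====
theorem assign_gender_label_spec : Claim_equal_assign_gender_label := by
  intro sentence male_words female_words _
  unfold Spec_assign_gender_label assign_gender_label assign_gender_label_alt
  simp only [foldl_flags_eq, Bool.false_or]
  rw [← any_contains_swap (PySem.Str.split₀ (PySem.Str.lower sentence)) male_words,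
      ← any_contains_swap (PySem.Str.split₀ (PySem.Str.lower sentence)) female_words]
  cases male_words.any (fun w => PySem.Set.contains (PySem.Set.ofList (PySem.Str.split₀ (PySem.Str.lower sentence))) w) <;>
    cases female_words.any (fun w => PySem.Set.contains (PySem.Set.ofList (PySem.Str.split₀ (PySem.Str.lower sentence))) w) <;>
    simp
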